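-- pv_equiv track=rewrite | github.com/cnkhalil0-lab/amazing | visualizing_maze.py | _inflate_grid
-- ===== SOURCE A (Python) =====
-- from typing import List, Tuple, Set
--
-- def _inflate_grid(dense_grid: List[List[int]]) -> List[List[int]]:
--     height = len(dense_grid)
--     width = len(dense_grid[0]) if height > 0 else 0
--     inflated = [[0 for _ in range(width * 3)] for _ in range(height * 3)]
--
--     for y in range(height):
--         for x in range(width):
--             cell_val = dense_grid[y][x]
--             iy, ix = y * 3, x * 3
--
--             # Corners are always walls
--             inflated[iy][ix] = 1
--             inflated[iy][ix + 2] = 1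
--             inflated[iy + 2][ix] = 1
--             inflated[iy + 2][ix + 2] = 1
--
--             # Edges based on bitwise flags
--             inflated[iy][ix + 1] = 1 if (cell_val & 1) != 0 else 0  # North
--             inflated[iy + 1][ix + 2] = 1 if (cell_val & 2) != 0 else 0  # East
--             inflated[iy + 2][ix + 1] = 1 if (cell_val & 4) != 0 else 0  # South
--             inflated[iy + 1][ix] = 1 if (cell_val & 8) != 0 else 0  # West
--
--     return inflated
-- ===== SOURCE B (Python) =====
-- # Row-by-row template concatenation: one fixed 3x3 block per wall-bit combination
-- # (N=1, E=2, S=4, W=8), looked up via cell & 15; output rows are built by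
-- # concatenating template rows instead of allocating a grid and mutating cells.
-- _TEMPLATES = [
--     [[1, 0, 1], [0, 0, 0], [1, 0, 1]],
--     [[1, 1, 1], [0, 0, 0], [1, 0, 1]],
--     [[1, 0, 1], [0, 0, 1], [1, 0, 1]],
--     [[1, 1, 1], [0, 0, 1], [1, 0, 1]],
--     [[1, 0, 1], [0, 0, 0], [1, 1, 1]],
--     [[1, 1, 1], [0, 0, 0], [1, 1, 1]],
--     [[1, 0, 1], [0, 0, 1], [1, 1, 1]],
--     [[1, 1, 1], [0, 0, 1], [1, 1, 1]],
--     [[1, 0, 1], [1, 0, 0], [1, 0, 1]],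
--     [[1, 1, 1], [1, 0, 0], [1, 0, 1]],
--     [[1, 0, 1], [1, 0, 1], [1, 0, 1]],
--     [[1, 1, 1], [1, 0, 1], [1, 0, 1]],
--     [[1, 0, 1], [1, 0, 0], [1, 1, 1]],
--     [[1, 1, 1], [1, 0, 0], [1, 1, 1]],
--     [[1, 0, 1], [1, 0, 1], [1, 1, 1]],
--     [[1, 1, 1], [1, 0, 1], [1, 1, 1]],
-- ]
--
--
-- def _inflate_grid(dense_grid):
--     height = len(dense_grid)
--     width = len(dense_grid[0]) if height > 0 else 0
--     out = []
--     for row in dense_grid: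
--         blocks = [_TEMPLATES[row[x] & 15] for x in range(width)]
--         for r in range(3):
--             out.append([v for b in blocks for v in b[r]])
--     return out
-- ===== Notes on version B (the rewrite author's own statement) =====
-- stated objective: simpler
-- what changed: A allocates a zero grid of size 3h x 3w and mutates eight cells per maze cell via index arithmetic; B builds the output row by row, concatenating rows of 16 precomputed 3x3 wall-bit templates looked up via cell & 15.
import Mathlib
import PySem

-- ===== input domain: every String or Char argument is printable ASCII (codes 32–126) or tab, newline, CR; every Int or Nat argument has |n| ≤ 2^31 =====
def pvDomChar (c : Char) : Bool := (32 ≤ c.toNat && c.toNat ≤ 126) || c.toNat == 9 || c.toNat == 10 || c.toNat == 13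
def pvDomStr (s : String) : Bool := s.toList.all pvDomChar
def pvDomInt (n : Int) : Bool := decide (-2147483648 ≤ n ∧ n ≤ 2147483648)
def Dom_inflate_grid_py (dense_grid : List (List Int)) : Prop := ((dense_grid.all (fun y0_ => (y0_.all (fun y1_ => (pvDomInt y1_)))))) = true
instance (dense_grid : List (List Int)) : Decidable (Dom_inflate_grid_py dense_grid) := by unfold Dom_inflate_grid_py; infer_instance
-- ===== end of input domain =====

-- B replaces A's allocate-then-mutate double loop by building the output row by
-- row, concatenating rows of 16 precomputed 3x3 wall templates (simpler; same value).

-- ===== PORT A =====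
-- inflated[i][j] = v  (the indices A produces are nonnegative and in range)
def pvSet2 (g : List (List Int)) (i j : Int) (v : Int) : List (List Int) :=
  g.set i.natAbs ((g.getD i.natAbs []).set j.natAbs v)

-- dense_grid[y][x]; exact for the in-range reads A performs under Pre_
def pvCell (dense_grid : List (List Int)) (y x : Int) : Int :=
  PySem.List.pyGetD (PySem.List.pyGetD dense_grid y []) x 0

-- body of A's inner loop: the eight element assignments for cell (y, x)
def pvCellStep (dense_grid : List (List Int)) (g : List (List Int)) (y x : Int) :
    List (List Int) :=
  let cell := pvCell dense_grid y x
  let iy := y * 3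
  let ix := x * 3
  let g := pvSet2 g iy ix 1
  let g := pvSet2 g iy (ix + 2) 1
  let g := pvSet2 g (iy + 2) ix 1
  let g := pvSet2 g (iy + 2) (ix + 2) 1
  let g := pvSet2 g iy (ix + 1) (if PySem.Int.band cell 1 ≠ 0 then 1 else 0)
  let g := pvSet2 g (iy + 1) (ix + 2) (if PySem.Int.band cell 2 ≠ 0 then 1 else 0)
  let g := pvSet2 g (iy + 2) (ix + 1) (if PySem.Int.band cell 4 ≠ 0 then 1 else 0)
  let g := pvSet2 g (iy + 1) ix (if PySem.Int.band cell 8 ≠ 0 then 1 else 0)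
  g

def inflate_grid_py (dense_grid : List (List Int)) : List (List Int) :=
  let height := dense_grid.length
  let width := if height > 0 then (dense_grid.headD []).length else 0
  let inflated := List.replicate (height * 3) (List.replicate (width * 3) (0 : Int))
  (PySem.List.pyRange 0 (height : Int) 1).foldl (fun g y =>
    (PySem.List.pyRange 0 (width : Int) 1).foldl (fun g x =>
      pvCellStep dense_grid g y x) g) inflated

-- ===== PORT B =====
-- _TEMPLATES: one 3x3 block per wall-bit combination (N=1, E=2, S=4, W=8)
def pvTemplates : List (List (List Int)) :=
  [[[1, 0, 1], [0, 0, 0], [1, 0, 1]],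
   [[1, 1, 1], [0, 0, 0], [1, 0, 1]],
   [[1, 0, 1], [0, 0, 1], [1, 0, 1]],
   [[1, 1, 1], [0, 0, 1], [1, 0, 1]],
   [[1, 0, 1], [0, 0, 0], [1, 1, 1]],
   [[1, 1, 1], [0, 0, 0], [1, 1, 1]],
   [[1, 0, 1], [0, 0, 1], [1, 1, 1]],
   [[1, 1, 1], [0, 0, 1], [1, 1, 1]],
   [[1, 0, 1], [1, 0, 0], [1, 0, 1]],
   [[1, 1, 1], [1, 0, 0], [1, 0, 1]],
   [[1, 0, 1], [1, 0, 1], [1, 0, 1]],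
   [[1, 1, 1], [1, 0, 1], [1, 0, 1]],
   [[1, 0, 1], [1, 0, 0], [1, 1, 1]],
   [[1, 1, 1], [1, 0, 0], [1, 1, 1]],
   [[1, 0, 1], [1, 0, 1], [1, 1, 1]],
   [[1, 1, 1], [1, 0, 1], [1, 1, 1]]]

-- _TEMPLATES[v & 15]  (the index is always 0..15, so natAbs/getD are exact)
def pvBlock (v : Int) : List (List Int) :=
  pvTemplates.getD (PySem.Int.band v 15).natAbs []

def inflate_grid_py_alt (dense_grid : List (List Int)) : List (List Int) :=
  let height := dense_grid.length
  let width := if height > 0 then (dense_grid.headD []).length else 0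
  dense_grid.foldl (fun out row =>
    let blocks := (PySem.List.pyRange 0 (width : Int) 1).map
      (fun x => pvBlock (PySem.List.pyGetD row x 0))
    out ++ (PySem.List.pyRange 0 3 1).map
      (fun r => blocks.flatMap (fun b => b.getD r.natAbs []))) []

-- ===== PRECONDITION & SPEC =====
-- Pre_ excludes exactly the ragged grids on which both Pythons raise IndexError:
-- a row shorter than the first row (both index row[x] for every x < len(row 0)).
def Pre_inflate_grid_py (dense_grid : List (List Int)) : Prop :=
  ∀ row ∈ dense_grid, (dense_grid.headD []).length ≤ row.length
instance (dense_grid : List (List Int)) : Decidable (Pre_inflate_grid_py dense_grid) := by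
  unfold Pre_inflate_grid_py; infer_instance

def pvWitness_inflate_grid_py : List (List Int) := [[3, 12], [5, 10]]

def Spec_inflate_grid_py (dense_grid : List (List Int)) (out : List (List Int)) : Prop :=
  out = inflate_grid_py_alt dense_grid
instance (dense_grid : List (List Int)) (out : List (List Int)) :
    Decidable (Spec_inflate_grid_py dense_grid out) := by
  unfold Spec_inflate_grid_py; infer_instance

-- ===== CLAIM (what is proved, stated in full; the proofs are below) =====
def Claim_equal_inflate_grid_py : Prop :=
  ∀ (dense_grid : List (List Int)), Dom_inflate_grid_py dense_grid →
    Pre_inflate_grid_py dense_grid →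
    Spec_inflate_grid_py dense_grid (inflate_grid_py dense_grid)

-- ===== LEMMAS AND PROOFS =====

-- the three rows of the wall block of a cell value, as A writes them
def pvTop (v : Int) : List Int := [1, if PySem.Int.band v 1 ≠ 0 then 1 else 0, 1]
def pvMid (v : Int) : List Int :=
  [if PySem.Int.band v 8 ≠ 0 then 1 else 0, 0, if PySem.Int.band v 2 ≠ 0 then 1 else 0]
def pvBot (v : Int) : List Int := [1, if PySem.Int.band v 4 ≠ 0 then 1 else 0, 1]

-- concatenated block rows of cells x = j, …, j+c-1 of maze row k
def pvStripOf (f : Int → List Int) (dg : List (List Int)) (k j c : Nat) : List Int :=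
  (List.range' j c).flatMap (fun (x : Nat) => f (pvCell dg ↑k ↑x))

lemma pvStripOf_succ (f : Int → List Int) (dg : List (List Int)) (k j c : Nat) :
    pvStripOf f dg k j (c + 1) = f (pvCell dg ↑k ↑j) ++ pvStripOf f dg k (j + 1) c := by
  simp [pvStripOf, List.range'_succ]

-- row-index strip lemmas: pvSet2 at row done.length + r only rewrites that row
lemma pvSet2_strip0 (done : List (List Int)) (a b c : List Int) (t : List (List Int))
    (j v : Int) :
    pvSet2 (done ++ a :: b :: c :: t) ↑done.length j v =
      done ++ a.set j.natAbs v :: b :: c :: t := by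
  simp [pvSet2]

lemma pvSet2_strip1 (done : List (List Int)) (a b c : List Int) (t : List (List Int))
    (j v : Int) :
    pvSet2 (done ++ a :: b :: c :: t) (↑done.length + 1) j v =
      done ++ a :: b.set j.natAbs v :: c :: t := by
  have h : ((done.length : Int) + 1).natAbs = done.length + 1 := by omega
  simp [pvSet2, h]

lemma pvSet2_strip2 (done : List (List Int)) (a b c : List Int) (t : List (List Int))
    (j v : Int) :
    pvSet2 (done ++ a :: b :: c :: t) (↑done.length + 2) j v =
      done ++ a :: b :: c.set j.natAbs v :: t := by
  have h : ((done.length : Int) + 2).natAbs = done.length + 2 := by omega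
  simp [pvSet2, h]

-- column strip lemmas on one row
lemma pvSetCol0 (p : List Int) (m : Nat) (h : p.length = m) (x0 x1 x2 : Int)
    (t : List Int) (v : Int) :
    (p ++ x0 :: x1 :: x2 :: t).set m v = p ++ v :: x1 :: x2 :: t := by
  subst h; simp

lemma pvSetCol1 (p : List Int) (m : Nat) (h : p.length = m) (x0 x1 x2 : Int)
    (t : List Int) (v : Int) :
    (p ++ x0 :: x1 :: x2 :: t).set (m + 1) v = p ++ x0 :: v :: x2 :: t := by
  subst h; simp

lemma pvSetCol2 (p : List Int) (m : Nat) (h : p.length = m) (x0 x1 x2 : Int)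
    (t : List Int) (v : Int) :
    (p ++ x0 :: x1 :: x2 :: t).set (m + 2) v = p ++ x0 :: x1 :: v :: t := by
  subst h; simp

-- one cell step turns the next 3x3 zero block into A's written block
lemma pvCellStep_eq (dg : List (List Int)) (done : List (List Int)) (k j : Nat)
    (pa pb pc ta tb tc : List Int) (tail : List (List Int))
    (hdone : done.length = k * 3) (hpa : pa.length = j * 3) (hpb : pb.length = j * 3)
    (hpc : pc.length = j * 3) :
    pvCellStep dg (done ++ (pa ++ 0 :: 0 :: 0 :: ta) :: (pb ++ 0 :: 0 :: 0 :: tb) ::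
        (pc ++ 0 :: 0 :: 0 :: tc) :: tail) ↑k ↑j =
      done ++ (pa ++ pvTop (pvCell dg ↑k ↑j) ++ ta) ::
        (pb ++ pvMid (pvCell dg ↑k ↑j) ++ tb) ::
        (pc ++ pvBot (pvCell dg ↑k ↑j) ++ tc) :: tail := by
  have r0 : ((k : Int)) * 3 = ↑done.length := by omega
  have c0 : (((j : Int)) * 3).natAbs = j * 3 := by omega
  have c1 : (((j : Int)) * 3 + 1).natAbs = j * 3 + 1 := by omega
  have c2 : (((j : Int)) * 3 + 2).natAbs = j * 3 + 2 := by omega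
  dsimp only [pvCellStep]
  rw [r0]
  rw [pvSet2_strip0, c0, pvSetCol0 pa _ hpa]
  rw [pvSet2_strip0, c2, pvSetCol2 pa _ hpa]
  rw [pvSet2_strip2, c0, pvSetCol0 pc _ hpc]
  rw [pvSet2_strip2, c2, pvSetCol2 pc _ hpc]
  rw [pvSet2_strip0, c1, pvSetCol1 pa _ hpa]
  rw [pvSet2_strip1, c2, pvSetCol2 pb _ hpb]
  rw [pvSet2_strip2, c1, pvSetCol1 pc _ hpc]
  rw [pvSet2_strip1, c0, pvSetCol0 pb _ hpb]
  simp [pvTop, pvMid, pvBot]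

-- inner loop: cells x = j, …, j+c-1 of row k extend the three current rows
lemma pvInner (dg : List (List Int)) (k : Nat) (done : List (List Int))
    (hdone : done.length = k * 3) :
    ∀ (c j : Nat) (pa pb pc : List Int) (tail : List (List Int)),
      pa.length = j * 3 → pb.length = j * 3 → pc.length = j * 3 →
      (List.range' j c).foldl (fun g (x : Nat) => pvCellStep dg g ↑k ↑x)
        (done ++ (pa ++ List.replicate (c * 3) 0) :: (pb ++ List.replicate (c * 3) 0) ::
          (pc ++ List.replicate (c * 3) 0) :: tail) =
      done ++ (pa ++ pvStripOf pvTop dg k j c) :: (pb ++ pvStripOf pvMid dg k j c) ::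
        (pc ++ pvStripOf pvBot dg k j c) :: tail := by
  intro c
  induction c with
  | zero => intro j pa pb pc tail hpa hpb hpc; simp [pvStripOf]
  | succ c ih =>
    intro j pa pb pc tail hpa hpb hpc
    have hrep : List.replicate ((c + 1) * 3) (0 : Int) =
        0 :: 0 :: 0 :: List.replicate (c * 3) 0 := by
      rw [show (c + 1) * 3 = (c * 3) + 1 + 1 + 1 by ring]
      simp [List.replicate_succ]
    rw [hrep, List.range'_succ]
    simp only [List.foldl_cons]
    rw [pvCellStep_eq dg done k j pa pb pc _ _ _ tail hdone hpa hpb hpc]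
    have h3t : (pvTop (pvCell dg ↑k ↑j)).length = 3 := rfl
    have h3m : (pvMid (pvCell dg ↑k ↑j)).length = 3 := rfl
    have h3b : (pvBot (pvCell dg ↑k ↑j)).length = 3 := rfl
    rw [ih (j + 1) (pa ++ pvTop (pvCell dg ↑k ↑j)) (pb ++ pvMid (pvCell dg ↑k ↑j))
      (pc ++ pvBot (pvCell dg ↑k ↑j)) tail (by simp [h3t, hpa]; ring)
      (by simp [h3m, hpb]; ring) (by simp [h3b, hpc]; ring)]
    simp [pvStripOf_succ]

-- outer loop: rows k, …, k+m-1 replace the remaining zero rows by block rows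
lemma pvOuter (dg : List (List Int)) (w : Nat) :
    ∀ (m k : Nat) (done : List (List Int)), done.length = k * 3 →
      (List.range' k m).foldl (fun g (y : Nat) =>
          (List.range w).foldl (fun g (x : Nat) => pvCellStep dg g ↑y ↑x) g)
        (done ++ List.replicate (m * 3) (List.replicate (w * 3) 0)) =
      done ++ (List.range' k m).flatMap (fun y =>
        [pvStripOf pvTop dg y 0 w, pvStripOf pvMid dg y 0 w, pvStripOf pvBot dg y 0 w]) := by
  intro m
  induction m with
  | zero => intro k done hdone; simp
  | succ m ih =>
    intro k done hdone
    have hrep : List.replicate ((m + 1) * 3) (List.replicate (w * 3) (0 : Int)) =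
        List.replicate (w * 3) 0 :: List.replicate (w * 3) 0 :: List.replicate (w * 3) 0 ::
          List.replicate (m * 3) (List.replicate (w * 3) 0) := by
      rw [show (m + 1) * 3 = (m * 3) + 1 + 1 + 1 by ring]
      simp [List.replicate_succ]
    rw [hrep, List.range'_succ]
    simp only [List.foldl_cons]
    have hin := pvInner dg k done hdone w 0 [] [] []
      (List.replicate (m * 3) (List.replicate (w * 3) 0)) rfl rfl rfl
    simp only [List.nil_append] at hin
    rw [← List.range_eq_range'] at hin
    rw [hin]
    have hsplit : done ++ pvStripOf pvTop dg k 0 w :: pvStripOf pvMid dg k 0 w ::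
        pvStripOf pvBot dg k 0 w :: List.replicate (m * 3) (List.replicate (w * 3) 0) =
        (done ++ [pvStripOf pvTop dg k 0 w, pvStripOf pvMid dg k 0 w,
          pvStripOf pvBot dg k 0 w]) ++ List.replicate (m * 3) (List.replicate (w * 3) 0) := by
      simp
    rw [hsplit, ih (k + 1) _ (by simp [hdone]; ring)]
    simp

lemma nat_and2 (n : Nat) : n &&& 2 = n % 4 - n % 2 := by
  have h1 := Nat.and_two_pow n 1
  rw [Nat.testBit_eq_decide_div_mod_eq] at h1
  norm_num at h1
  by_cases hd : n / 2 % 2 = 1 <;> simp [hd] at h1 <;> omega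

lemma nat_and4 (n : Nat) : n &&& 4 = n % 8 - n % 4 := by
  have h1 := Nat.and_two_pow n 2
  rw [Nat.testBit_eq_decide_div_mod_eq] at h1
  norm_num at h1
  by_cases hd : n / 4 % 2 = 1 <;> simp [hd] at h1 <;> omega

lemma nat_and8 (n : Nat) : n &&& 8 = n % 16 - n % 8 := by
  have h1 := Nat.and_two_pow n 3
  rw [Nat.testBit_eq_decide_div_mod_eq] at h1
  norm_num at h1
  by_cases hd : n / 8 % 2 = 1 <;> simp [hd] at h1 <;> omega

lemma pvBand1 (v : Int) : PySem.Int.band v 1 = v % 2 := by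
  rw [PySem.Int.band_one, PySem.Int.mod_eq_emod_of_pos (by norm_num)]

lemma pvBand2 (v : Int) : PySem.Int.band v 2 = v % 4 - v % 2 := by
  unfold PySem.Int.band
  rcases le_or_gt 0 v with h | h
  · rw [if_pos h, if_pos (by norm_num)]
    rw [show (2:Int).toNat = 2 from rfl, nat_and2]; omega
  · rw [if_neg (by omega), if_pos (by norm_num)]
    rw [show (2:Int).toNat = 2 from rfl, Nat.and_comm, nat_and2]; omega

lemma pvBand4 (v : Int) : PySem.Int.band v 4 = v % 8 - v % 4 := by
  unfold PySem.Int.band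
  rcases le_or_gt 0 v with h | h
  · rw [if_pos h, if_pos (by norm_num)]
    rw [show (4:Int).toNat = 4 from rfl, nat_and4]; omega
  · rw [if_neg (by omega), if_pos (by norm_num)]
    rw [show (4:Int).toNat = 4 from rfl, Nat.and_comm, nat_and4]; omega

lemma pvBand8 (v : Int) : PySem.Int.band v 8 = v % 16 - v % 8 := by
  unfold PySem.Int.band
  rcases le_or_gt 0 v with h | h
  · rw [if_pos h, if_pos (by norm_num)]
    rw [show (8:Int).toNat = 8 from rfl, nat_and8]; omega
  · rw [if_neg (by omega), if_pos (by norm_num)]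
    rw [show (8:Int).toNat = 8 from rfl, Nat.and_comm, nat_and8]; omega

lemma pvBand15 (v : Int) : PySem.Int.band v 15 = v % 16 := by
  unfold PySem.Int.band
  rcases le_or_gt 0 v with h | h
  · rw [if_pos h, if_pos (by norm_num)]
    rw [show (15:Int).toNat = 15 from rfl,
      show v.toNat &&& 15 = v.toNat % 16 from by
        simpa using Nat.and_two_pow_sub_one_eq_mod v.toNat 4]
    omega
  · rw [if_neg (by omega), if_pos (by norm_num)]
    rw [show (15:Int).toNat = 15 from rfl, Nat.and_comm,
      show (-v-1).toNat &&& 15 = (-v-1).toNat % 16 from by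
        simpa using Nat.and_two_pow_sub_one_eq_mod (-v-1).toNat 4]
    omega

-- B's template lookup is exactly the triple of rows A writes for that cell
lemma pvBlock_eq (v : Int) : pvBlock v = [pvTop v, pvMid v, pvBot v] := by
  unfold pvBlock pvTop pvMid pvBot
  rw [pvBand15, pvBand1, pvBand2, pvBand4, pvBand8]
  have h2 : v % 2 = v % 16 % 2 := (Int.emod_emod_of_dvd v (by norm_num)).symm
  have h4 : v % 4 = v % 16 % 4 := (Int.emod_emod_of_dvd v (by norm_num)).symm
  have h8 : v % 8 = v % 16 % 8 := (Int.emod_emod_of_dvd v (by norm_num)).symm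
  rw [h2, h4, h8]
  have h0 : 0 ≤ v % 16 := Int.emod_nonneg v (by norm_num)
  have h16 : v % 16 < 16 := Int.emod_lt_of_pos v (by norm_num)
  interval_cases h : (v % 16) <;> decide

-- flatMap over row indices = flatMap over the rows themselves
lemma pvFlatMap_range_getD {α β : Type} (l : List α) (d : α) (F : α → List β) :
    (List.range l.length).flatMap (fun y => F (l.getD y d)) = l.flatMap F := by
  induction l with
  | nil => simp
  | cons a l ih =>
    simp only [List.length_cons, List.range_succ_eq_map, List.flatMap_cons, List.flatMap_map]
    simpa using congrArg (F a ++ ·) ih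

theorem pv_main (dg : List (List Int)) : inflate_grid_py dg = inflate_grid_py_alt dg := by
  have hA : inflate_grid_py dg =
      (List.range dg.length).flatMap (fun y =>
        [(List.range (if dg.length > 0 then (dg.headD []).length else 0)).flatMap
            (fun x => pvTop ((dg.getD y []).getD x 0)),
         (List.range (if dg.length > 0 then (dg.headD []).length else 0)).flatMap
            (fun x => pvMid ((dg.getD y []).getD x 0)),
         (List.range (if dg.length > 0 then (dg.headD []).length else 0)).flatMap
            (fun x => pvBot ((dg.getD y []).getD x 0))]) := by
    dsimp only [inflate_grid_py]
    simp only [PySem.List.pyRange_zero_natCast, List.foldl_map]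
    have h0 := pvOuter dg (if dg.length > 0 then (dg.headD []).length else 0)
      dg.length 0 [] rfl
    simp only [List.nil_append] at h0
    rw [← List.range_eq_range'] at h0
    rw [h0]
    simp only [pvStripOf, pvCell, PySem.List.pyGetD_natCast, ← List.range_eq_range']
  have hB : inflate_grid_py_alt dg =
      (List.range dg.length).flatMap (fun y =>
        [(List.range (if dg.length > 0 then (dg.headD []).length else 0)).flatMap
            (fun x => pvTop ((dg.getD y []).getD x 0)),
         (List.range (if dg.length > 0 then (dg.headD []).length else 0)).flatMap
            (fun x => pvMid ((dg.getD y []).getD x 0)),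
         (List.range (if dg.length > 0 then (dg.headD []).length else 0)).flatMap
            (fun x => pvBot ((dg.getD y []).getD x 0))]) := by
    dsimp only [inflate_grid_py_alt]
    rw [PySem.List.foldl_append_eq_flatMap]
    simp only [List.nil_append]
    rw [← pvFlatMap_range_getD dg []]
    simp only [show PySem.List.pyRange 0 3 1 = [0, 1, 2] from rfl, List.map_cons, List.map_nil,
      Int.natAbs_zero, Int.natAbs_one, PySem.List.pyRange_zero_natCast, List.map_map,
      List.flatMap_map, pvBlock_eq]
    norm_num
  rw [hA, hB]

-- ===== VERDICT (by name: the statement is the Claim_ definition above) =====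
theorem inflate_grid_py_spec : Claim_equal_inflate_grid_py := by
  intro dg _ _
  unfold Spec_inflate_grid_py
  exact pv_main dg
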